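-- pv_equiv track=rewrite | github.com/pypi-data/pypi-mirror-220 | packages/geovisio/geovisio-2.1.0-py3-none-any.whl/geovisio/pictures.py | getTileSize
-- ===== SOURCE A (Python) =====
-- def getTileSize(imgSize):
--     """Compute ideal amount of rows and columns to give a tiled version of an image according to its original size
--
--     Parameters
--     ----------
--     imgSize : tuple
--         Original image size, as (width, height)
--
--     Returns
--     -------
--     tuple
--         Ideal tile splitting as (cols, rows)
--     """
--
--     possibleCols = [4, 8, 16, 32, 64]  # Limitation of PSV, see https://photo-sphere-viewer.js.org/guide/adapters/tiles.html#cols-required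
--     idealCols = max(min(int(int(imgSize[0] / 512) / 2) * 2, 64), 4)
--     cols = possibleCols[0]
--     for c in possibleCols:
--         if idealCols >= c:
--             cols = c
--     return (int(cols), int(cols / 2))
-- ===== SOURCE B (Python) =====
-- # Threshold table on the raw width: A's clamped idealCols picks the largest
-- # power-of-two column count whose minimum width (cols*512) the image reaches.
-- _TILE_THRESHOLDS = ((64, 32768), (32, 16384), (16, 8192), (8, 4096))
--
-- def getTileSize(imgSize):
--     w = imgSize[0]
--     for cols, minWidth in _TILE_THRESHOLDS:
--         if w >= minWidth:
--             return (cols, cols // 2)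
--     return (4, 2)
-- ===== Notes on version B (the rewrite author's own statement) =====
-- stated objective: alternative
-- what changed: B drops the idealCols arithmetic (truncated divisions, doubling, clamping) and the scanning loop over the candidate list entirely, replacing them with a first-match lookup in a precomputed (cols, minWidth) threshold table on the raw width, with early return.
import Mathlib
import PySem

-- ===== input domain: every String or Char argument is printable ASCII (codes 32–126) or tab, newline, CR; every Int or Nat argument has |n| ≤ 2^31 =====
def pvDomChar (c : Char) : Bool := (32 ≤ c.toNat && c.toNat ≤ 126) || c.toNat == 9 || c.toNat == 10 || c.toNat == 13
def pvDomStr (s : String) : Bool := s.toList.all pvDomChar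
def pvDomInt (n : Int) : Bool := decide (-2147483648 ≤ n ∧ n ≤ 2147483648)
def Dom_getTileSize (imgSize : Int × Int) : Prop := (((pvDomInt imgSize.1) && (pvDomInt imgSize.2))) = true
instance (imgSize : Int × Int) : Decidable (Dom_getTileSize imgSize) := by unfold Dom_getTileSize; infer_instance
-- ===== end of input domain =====

-- B replaces A's idealCols arithmetic + candidate-list loop by a first-match threshold table on the raw width; alternative, same values.


-- ===== PORT A =====
-- int(imgSize[0] / 512): float division by a power of two is exact for |x| ≤ 2^31 (< 2^53) and int()
-- truncates toward zero, so it equals Int.tdiv (truncated division); likewise int(… / 2).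
def getTileSize (imgSize : Int × Int) : Int × Int :=
  let possibleCols : List Int := [4, 8, 16, 32, 64]
  let idealCols : Int := max (min ((Int.tdiv (Int.tdiv imgSize.1 512) 2) * 2) 64) 4
  -- cols = possibleCols[0]; for c in possibleCols: if idealCols >= c: cols = c
  let cols : Int := possibleCols.foldl (fun cols c => if idealCols ≥ c then c else cols) 4
  -- int(cols / 2): cols is a power of two ≥ 4, /2 exact, truncation = Int.tdiv
  (cols, Int.tdiv cols 2)

-- ===== PORT B =====
-- the threshold table _TILE_THRESHOLDS
def pvTileThresholds : List (Int × Int) := [(64, 32768), (32, 16384), (16, 8192), (8, 4096)]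

-- the for-loop with early return: first entry whose minWidth the width reaches, else (4, 2)
def pvFirstMatch (w : Int) : List (Int × Int) → Int × Int
  | [] => (4, 2)
  | (cols, minWidth) :: rest =>
      if w ≥ minWidth then (cols, PySem.Int.floordiv cols 2) else pvFirstMatch w rest

def getTileSize_alt (imgSize : Int × Int) : Int × Int :=
  pvFirstMatch imgSize.1 pvTileThresholds

-- ===== PRECONDITION & SPEC =====
def Spec_getTileSize (imgSize : Int × Int) (out : Int × Int) : Prop := out = getTileSize_alt imgSize
instance (imgSize : Int × Int) (out : Int × Int) : Decidable (Spec_getTileSize imgSize out) := by unfold Spec_getTileSize; infer_instance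

-- ===== CLAIM (what is proved, stated in full; the proofs are below) =====
def Claim_equal_getTileSize : Prop := ∀ (imgSize : Int × Int), Dom_getTileSize imgSize → Spec_getTileSize imgSize (getTileSize imgSize)

-- ===== LEMMAS AND PROOFS =====

-- Truncated division by a positive constant, written with Euclidean division so that omega can reason about it.
theorem pv_tdiv_char (w d : Int) : Int.tdiv w d = if 0 ≤ w then w / d else -((-w) / d) := by
  by_cases h : 0 ≤ w
  · simp [h, Int.tdiv_eq_ediv_of_nonneg h]
  · have hn : Int.tdiv w d = -Int.tdiv (-w) d := by rw [Int.neg_tdiv]; ring_nf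
    rw [hn, Int.tdiv_eq_ediv_of_nonneg (by omega)]
    simp [h]

-- A's clamped idealCols crosses each candidate c ∈ {8,16,32,64} exactly when the width reaches c*512.
theorem pv_ideal_ge (w c : Int) (hc : c = 8 ∨ c = 16 ∨ c = 32 ∨ c = 64) :
    (max (min ((Int.tdiv (Int.tdiv w 512) 2) * 2) 64) 4 ≥ c) ↔ w ≥ c * 512 := by
  rw [pv_tdiv_char w 512, pv_tdiv_char _ 2]
  rcases hc with rfl | rfl | rfl | rfl <;> split_ifs <;> omega

-- With the crossing lemma, A's loop over [4,8,16,32,64] picks exactly B's first-matching threshold.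
theorem pv_core (w : Int) :
    (let idealCols : Int := max (min ((Int.tdiv (Int.tdiv w 512) 2) * 2) 64) 4
     let cols : Int := ([4, 8, 16, 32, 64] : List Int).foldl
        (fun cols c => if idealCols ≥ c then c else cols) 4
     ((cols, Int.tdiv cols 2) : Int × Int)) = pvFirstMatch w pvTileThresholds := by
  have h8 := pv_ideal_ge w 8 (by tauto)
  have h16 := pv_ideal_ge w 16 (by tauto)
  have h32 := pv_ideal_ge w 32 (by tauto)
  have h64 := pv_ideal_ge w 64 (by tauto)
  have h4 : max (min ((Int.tdiv (Int.tdiv w 512) 2) * 2) 64) 4 ≥ 4 := le_max_right _ _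
  simp only [List.foldl, pvFirstMatch, pvTileThresholds]
  generalize hI : max (min ((Int.tdiv (Int.tdiv w 512) 2) * 2) 64) 4 = i at h4 h8 h16 h32 h64 ⊢
  split_ifs <;> first | decide | omega

-- ===== VERDICT (by name: the statement is the Claim_ definition above) =====
theorem getTileSize_spec : Claim_equal_getTileSize := by
  intro imgSize _
  unfold Spec_getTileSize getTileSize getTileSize_alt
  exact pv_core imgSize.1
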